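-- pv_equiv track=rewrite | github.com/LingSiewWin/CarPlateDetection-Python | core/char_segmentation.py | preprocess_ocr_text
-- ===== SOURCE A (Python) =====
-- def preprocess_ocr_text(text):
--     text = text.upper().replace(' ', '').replace('-', '')
--
--     # Only correct the first 1-3 chars (prefix)
--     prefix_raw = text[:3]
--     number_raw = text[3:]
--
--     # Corrections for prefix only
--     prefix_corrections = {
--         '0': 'O', '1': 'I', '8': 'B', '5': 'S', '6': 'G', '2': 'Z', 'Q': 'O',
--         '13': 'B'
--     }
--     for wrong, right in prefix_corrections.items():
--         prefix_raw = prefix_raw.replace(wrong, right)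
--     prefix = ''.join(c for c in prefix_raw if c.isalpha())
--
--     # For the number part, keep only digits, no correction
--     numbers = ''.join(c for c in number_raw if c.isdigit())
--
--     return prefix + numbers
-- ===== SOURCE B (Python) =====
-- def preprocess_ocr_text(text):
--     cleaned = text.upper().replace(' ', '').replace('-', '')
--     corrections = {'0': 'O', '1': 'I', '8': 'B', '5': 'S', '6': 'G', '2': 'Z', 'Q': 'O'}
--     prefix = []
--     numbers = []
--     for i, c in enumerate(cleaned):
--         if i < 3:
--             r = corrections.get(c, c)
--             if r.isalpha():
--                 prefix.append(r)
--         elif c.isdigit():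
--             numbers.append(c)
--     return ''.join(prefix) + ''.join(numbers)
-- ===== Notes on version B (the rewrite author's own statement) =====
-- stated objective: simpler
-- what changed: Replaces the seven sequential whole-prefix string.replace passes (plus the dead '13' rule) and the two separate comprehensions with one enumerate pass over the cleaned string that applies a per-character correction map to the first three characters and routes characters into prefix/number accumulators.
import Mathlib
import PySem

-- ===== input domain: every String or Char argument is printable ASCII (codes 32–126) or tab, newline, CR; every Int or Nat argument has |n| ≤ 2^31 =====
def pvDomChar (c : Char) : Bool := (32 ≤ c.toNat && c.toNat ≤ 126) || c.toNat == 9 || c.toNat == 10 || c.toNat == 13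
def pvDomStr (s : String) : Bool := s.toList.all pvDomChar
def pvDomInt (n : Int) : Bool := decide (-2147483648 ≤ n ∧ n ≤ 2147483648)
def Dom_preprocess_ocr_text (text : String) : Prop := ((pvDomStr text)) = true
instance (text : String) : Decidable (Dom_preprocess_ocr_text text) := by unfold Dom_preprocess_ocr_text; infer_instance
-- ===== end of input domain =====

-- B replaces A's seven sequential whole-prefix replace passes (plus the dead '13' rule)
-- and two comprehensions with one enumerate pass using a per-character correction map (objective: simpler).

-- ===== PORT A =====
def preprocess_ocr_text (text : String) : String :=
  let cs := PySem.Chars.replace (PySem.Chars.replace (PySem.Chars.upper text.toList) [' '] []) ['-'] []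
  let prefix_raw := PySem.List.slice cs none (some 3)
  let number_raw := PySem.List.slice cs (some 3) none
  let prefix_corrections : List (List Char × List Char) :=
    [(['0'], ['O']), (['1'], ['I']), (['8'], ['B']), (['5'], ['S']),
     (['6'], ['G']), (['2'], ['Z']), (['Q'], ['O']), (['1', '3'], ['B'])]
  let prefix_raw := prefix_corrections.foldl (fun acc p => PySem.Chars.replace acc p.1 p.2) prefix_raw
  let pre := prefix_raw.filter PySem.Chars.isalpha
  let nums := number_raw.filter PySem.Chars.isdigit
  String.ofList (pre ++ nums)

-- ===== PORT B =====
def pvCorr (c : Char) : Char :=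
  if c = '0' then 'O' else if c = '1' then 'I' else if c = '8' then 'B'
  else if c = '5' then 'S' else if c = '6' then 'G' else if c = '2' then 'Z'
  else if c = 'Q' then 'O' else c

-- the loop body of B
def pvStep (acc : List Char × List Char) (ic : Int × Char) : List Char × List Char :=
  if ic.1 < 3 then
    let r := pvCorr ic.2
    if PySem.Chars.isalpha r then (acc.1 ++ [r], acc.2) else acc
  else if PySem.Chars.isdigit ic.2 then (acc.1, acc.2 ++ [ic.2]) else acc

def preprocess_ocr_text_alt (text : String) : String :=
  let cleaned := PySem.Chars.replace (PySem.Chars.replace (PySem.Chars.upper text.toList) [' '] []) ['-'] []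
  let acc := (PySem.List.enumerate cleaned).foldl pvStep ([], [])
  String.ofList (acc.1 ++ acc.2)

-- ===== PRECONDITION & SPEC =====
def Spec_preprocess_ocr_text (text : String) (out : String) : Prop := out = preprocess_ocr_text_alt text
instance (text : String) (out : String) : Decidable (Spec_preprocess_ocr_text text out) := by unfold Spec_preprocess_ocr_text; infer_instance

-- ===== CLAIM (what is proved, stated in full; the proofs are below) =====
def Claim_equal_preprocess_ocr_text : Prop := ∀ (text : String), Dom_preprocess_ocr_text text → Spec_preprocess_ocr_text text (preprocess_ocr_text text)

-- ===== LEMMAS AND PROOFS =====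

-- single-character substitution as a function (proof helper)
def pvSub (a b c : Char) : Char := if c = a then b else c

-- single-character replace is a map
theorem replace_go_single (a b : Char) :
    ∀ (l : List Char) (fuel : Nat) (acc : List Char), l.length ≤ fuel →
      PySem.Chars.replace.go [a] [b] fuel l acc = acc.reverse ++ l.map (pvSub a b) := by
  intro l
  induction l with
  | nil =>
      intro fuel acc _
      cases fuel <;> simp [PySem.Chars.replace.go]
  | cons c t ih =>
      intro fuel acc h
      cases fuel with
      | zero => simp at h
      | succ f =>
          have hle : t.length ≤ f := by simpa using Nat.succ_le_succ_iff.mp (by simpa using h)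
          simp only [PySem.Chars.replace.go, List.isPrefixOf, Bool.and_true, List.reverse_cons, List.reverse_nil, List.nil_append]
          by_cases hc : a = c
          · subst hc
            simp [ih f (b :: acc) hle, pvSub]
          · simp [hc, Ne.symm hc, ih f (c :: acc) hle, pvSub]

theorem replace_single (a b : Char) (l : List Char) :
    PySem.Chars.replace l [a] [b] = l.map (pvSub a b) := by
  simp [PySem.Chars.replace, replace_go_single a b l l.length [] le_rfl]

-- the '13' rule never fires once '1' is gone
theorem replace_go_13 :
    ∀ (l : List Char) (fuel : Nat) (acc : List Char), l.length ≤ fuel → '1' ∉ l →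
      PySem.Chars.replace.go ['1', '3'] ['B'] fuel l acc = acc.reverse ++ l := by
  intro l
  induction l with
  | nil =>
      intro fuel acc _ _
      cases fuel <;> simp [PySem.Chars.replace.go]
  | cons c t ih =>
      intro fuel acc h hm
      cases fuel with
      | zero => simp at h
      | succ f =>
          have hle : t.length ≤ f := by simpa using Nat.succ_le_succ_iff.mp (by simpa using h)
          have hc : c ≠ '1' := by simp at hm; tauto
          have hm' : '1' ∉ t := by simp at hm; tauto
          simp only [PySem.Chars.replace.go, List.isPrefixOf]
          simp [Ne.symm hc, ih f (c :: acc) hle hm']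

theorem replace_13 (l : List Char) (h : '1' ∉ l) :
    PySem.Chars.replace l ['1', '3'] ['B'] = l := by
  simp [PySem.Chars.replace, replace_go_13 l l.length [] le_rfl h]

-- the chained single-char substitutions equal the per-character map
theorem corr_comp (c : Char) :
    pvSub 'Q' 'O' (pvSub '2' 'Z' (pvSub '6' 'G' (pvSub '5' 'S'
      (pvSub '8' 'B' (pvSub '1' 'I' (pvSub '0' 'O' c)))))) = pvCorr c := by
  by_cases h0 : c = '0'; · subst h0; decide
  by_cases h1 : c = '1'; · subst h1; decide
  by_cases h8 : c = '8'; · subst h8; decide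
  by_cases h5 : c = '5'; · subst h5; decide
  by_cases h6 : c = '6'; · subst h6; decide
  by_cases h2 : c = '2'; · subst h2; decide
  by_cases hQ : c = 'Q'; · subst hQ; decide
  simp [pvSub, pvCorr, h0, h1, h8, h5, h6, h2, hQ]

theorem maps_chain (l : List Char) :
    List.map (pvSub 'Q' 'O') (List.map (pvSub '2' 'Z') (List.map (pvSub '6' 'G')
      (List.map (pvSub '5' 'S') (List.map (pvSub '8' 'B') (List.map (pvSub '1' 'I')
        (List.map (pvSub '0' 'O') l)))))) = l.map pvCorr := by
  induction l with
  | nil => rfl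
  | cons c t ih =>
      simp only [List.map_cons]
      rw [ih, corr_comp]

theorem corr_ne_one (c : Char) : pvCorr c ≠ '1' := by
  unfold pvCorr
  split_ifs <;> simp_all

-- A's fold of replaces over the prefix is the pointwise correction map
theorem foldl_corrections (l : List Char) :
    ([(['0'], ['O']), (['1'], ['I']), (['8'], ['B']), (['5'], ['S']),
      (['6'], ['G']), (['2'], ['Z']), (['Q'], ['O']), (['1', '3'], ['B'])].foldl
      (fun acc p => PySem.Chars.replace acc p.1 p.2) l) = l.map pvCorr := by
  simp only [List.foldl_cons, List.foldl_nil, replace_single]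
  rw [maps_chain]
  refine replace_13 _ ?_
  intro hmem
  rcases List.mem_map.mp hmem with ⟨c, -, hc⟩
  exact corr_ne_one c hc

-- B's fold characterised, for any starting index and accumulators
theorem foldl_enum (l : List Char) :
    ∀ (k : Nat) (p n : List Char),
      (PySem.List.enumerate l (k : Int)).foldl pvStep (p, n)
      = (p ++ (List.map pvCorr (l.take (3 - k))).filter PySem.Chars.isalpha,
         n ++ (l.drop (3 - k)).filter PySem.Chars.isdigit) := by
  induction l with
  | nil => intro k p n; simp [PySem.List.enumerate]
  | cons c t ih =>
      intro k p n
      rw [PySem.List.enumerate_cons]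
      simp only [List.foldl_cons]
      have hcast : ((k : Int) + 1) = ((k + 1 : Nat) : Int) := by push_cast; ring
      rw [hcast]
      by_cases hk : k < 3
      · have h3 : 3 - k = (3 - (k + 1)) + 1 := by omega
        have hki : ((k : Int) < 3) := by exact_mod_cast hk
        by_cases ha : PySem.Chars.isalpha (pvCorr c) = true
        · rw [show pvStep (p, n) ((k : Int), c) = (p ++ [pvCorr c], n) by simp [pvStep, hki, ha]]
          rw [ih (k + 1) (p ++ [pvCorr c]) n, h3]
          simp [ha]
        · rw [show pvStep (p, n) ((k : Int), c) = (p, n) by simp [pvStep, hki, ha]]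
          rw [ih (k + 1) p n, h3]
          simp [ha]
      · have h3 : 3 - k = 0 := by omega
        have h3' : 3 - (k + 1) = 0 := by omega
        have hk' : ¬ ((k : Int) < 3) := by exact_mod_cast hk
        by_cases hd : PySem.Chars.isdigit c = true
        · rw [show pvStep (p, n) ((k : Int), c) = (p, n ++ [c]) by simp [pvStep, hk', hd]]
          rw [ih (k + 1) p (n ++ [c]), h3, h3']
          simp [hd]
        · rw [show pvStep (p, n) ((k : Int), c) = (p, n) by simp [pvStep, hk', hd]]
          rw [ih (k + 1) p n, h3, h3']
          simp [hd]

-- ===== VERDICT (by name: the statement is the Claim_ definition above) =====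
theorem preprocess_ocr_text_spec : Claim_equal_preprocess_ocr_text := by
  intro text _
  show preprocess_ocr_text text = preprocess_ocr_text_alt text
  unfold preprocess_ocr_text preprocess_ocr_text_alt
  dsimp only
  rw [foldl_corrections]
  have hB := foldl_enum
    (PySem.Chars.replace (PySem.Chars.replace (PySem.Chars.upper text.toList) [' '] []) ['-'] []) 0 [] []
  simp only [Nat.cast_zero, Nat.sub_zero, List.nil_append] at hB
  rw [hB]
  have e3 : ((3 : Int)) = ((3 : Nat) : Int) := by norm_num
  rw [e3, PySem.List.slice_to_natCast, PySem.List.slice_from_natCast]
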